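-- pv_equiv track=rewrite | github.com/pypi-data/pypi-mirror-404 | packages/nlbone/nlbone-0.11.1.tar.gz/nlbone-0.11.1/src/nlbone/interfaces/api/additional_filed/resolver.py | build_field_scope
-- ===== SOURCE A (Python) =====
-- from collections import defaultdict
-- from typing import Dict, List, Set, Tuple
--
-- def build_field_scope(requested_fields: Set[str]) -> dict[str, set[str]]:
--     """
--     {'variants', 'variants.cost', 'supplier.address.city'} →
--     {
--       'variants': {'', 'cost'},
--       'supplier': {'address.city'}
--     }
--     """
--     scope: dict[str, set[str]] = defaultdict(set)
--     for f in requested_fields: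
--         parts = f.split(".", 1)
--         root = parts[0]
--         suffix = parts[1] if len(parts) == 2 else ""  # '' یعنی خود root
--         scope[root].add(suffix)
--     return scope
-- ===== SOURCE B (Python) =====
-- # B: two-pass grouping — split everything once, dedup the roots in first-occurrence
-- # order, then build each root's suffix set by a filtered comprehension over the pairs.
-- from collections import defaultdict
--
--
-- def build_field_scope(requested_fields):
--     pairs = [f.split(".", 1) for f in requested_fields]
--     roots = list(dict.fromkeys(p[0] for p in pairs))
--     scope = defaultdict(set)
--     for r in roots:
--         scope[r] = {p[1] if len(p) == 2 else "" for p in pairs if p[0] == r}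
--     return scope
-- ===== Notes on version B (the rewrite author's own statement) =====
-- stated objective: alternative
-- what changed: Replaces A's single-pass defaultdict accumulation with a two-pass grouping: split every field once, deduplicate the roots in first-occurrence order, then build each root's suffix set by one filtered comprehension over the pre-split pairs.
import Mathlib
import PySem

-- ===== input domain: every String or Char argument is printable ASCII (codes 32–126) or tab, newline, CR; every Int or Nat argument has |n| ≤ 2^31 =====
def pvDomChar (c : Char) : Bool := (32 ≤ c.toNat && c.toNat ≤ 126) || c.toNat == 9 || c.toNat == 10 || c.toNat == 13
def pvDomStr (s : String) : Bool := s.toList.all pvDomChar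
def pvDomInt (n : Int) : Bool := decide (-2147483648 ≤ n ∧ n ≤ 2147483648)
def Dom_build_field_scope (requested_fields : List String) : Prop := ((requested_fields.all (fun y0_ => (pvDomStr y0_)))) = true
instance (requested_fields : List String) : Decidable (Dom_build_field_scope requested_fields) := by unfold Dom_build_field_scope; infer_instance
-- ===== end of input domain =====

-- B replaces A's dict-accumulation single pass by a two-pass grouping (split once,
-- dedup the roots, then one filtered set comprehension per root); objective: alternative.

-- ===== PORT A =====
-- A: defaultdict(set) accumulation; scope[root].add(suffix) is Dict.modify root [] (Set.add · suffix).
-- parts[0]/parts[1] use pyGet?/.getD "": split(".",1) never returns [] and parts[1] is read only when len = 2, so exact.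
def build_field_scope (requested_fields : List String) : List (String × List String) :=
  let scope : PySem.Dict String (PySem.Set String) :=
    requested_fields.foldl (fun scope f =>
      let parts := (PySem.Str.splitMax? f "." 1).getD []
      let root := (PySem.List.pyGet? parts 0).getD ""
      let suffix := if parts.length = 2 then (PySem.List.pyGet? parts 1).getD "" else ""
      scope.modify root [] (fun s => PySem.Set.add s suffix)) PySem.Dict.empty
  scope.items

-- ===== PORT B =====
def bfsParts (f : String) : List String := (PySem.Str.splitMax? f "." 1).getD []
def bfsRoot (p : List String) : String := (PySem.List.pyGet? p 0).getD ""
def bfsSuffix (p : List String) : String := if p.length = 2 then (PySem.List.pyGet? p 1).getD "" else ""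
-- B: pairs = all split results; roots = list(dict.fromkeys(…)) = PySem.List.dedup;
-- scope[r] = {suffix for matching pairs} = Set.ofList; the defaultdict is filled with
-- fresh keys in roots order, so its items are exactly this map.
def build_field_scope_alt (requested_fields : List String) : List (String × List String) :=
  let pairs := requested_fields.map bfsParts
  let roots := PySem.List.dedup (pairs.map bfsRoot)
  roots.map (fun r => (r, PySem.Set.ofList ((pairs.filter (fun p => bfsRoot p == r)).map bfsSuffix)))

-- ===== PRECONDITION & SPEC =====
def Spec_build_field_scope (requested_fields : List String) (out : List (String × List String)) : Prop := out = build_field_scope_alt requested_fields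
instance (requested_fields : List String) (out : List (String × List String)) : Decidable (Spec_build_field_scope requested_fields out) := by unfold Spec_build_field_scope; infer_instance

-- ===== CLAIM (what is proved, stated in full; the proofs are below) =====
def Claim_equal_build_field_scope : Prop := ∀ (requested_fields : List String), Dom_build_field_scope requested_fields → Spec_build_field_scope requested_fields (build_field_scope requested_fields)

-- ===== LEMMAS AND PROOFS =====

-- root/suffix of one field, as A computes them inline
def pvKey (f : String) : String := bfsRoot (bfsParts f)
def pvSfx (f : String) : String := bfsSuffix (bfsParts f)

lemma comp_key : (bfsRoot ∘ bfsParts) = pvKey := rfl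
lemma comp_sfx : (bfsSuffix ∘ bfsParts) = pvSfx := rfl

-- A's loop body, with the lets resolved
lemma loopA_eq (requested_fields : List String) :
    build_field_scope requested_fields =
      (requested_fields.foldl
        (fun d f => d.modify (pvKey f) [] (fun s => PySem.Set.add s (pvSfx f)))
        PySem.Dict.empty).items := by
  simp only [build_field_scope, pvKey, pvSfx, bfsParts, bfsRoot, bfsSuffix]

-- the value the accumulation loop leaves at key r
lemma getD_loop (l : List String) (d : PySem.Dict String (PySem.Set String)) (r : String) :
    (l.foldl (fun d f => d.modify (pvKey f) [] (fun s => PySem.Set.add s (pvSfx f))) d).getD r []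
      = PySem.Set.update (d.getD r []) ((l.filter (fun f => pvKey f == r)).map pvSfx) := by
  induction l generalizing d with
  | nil => simp [PySem.Set.update]
  | cons a t ih =>
      simp only [List.foldl_cons, ih, List.filter_cons]
      by_cases h : pvKey a = r
      · simp [h, PySem.Set.update]
      · have h' : (pvKey a == r) = false := by simp [h]
        simp [h', PySem.Dict.getD_modify, Ne.symm h]

-- ===== VERDICT =====
theorem build_field_scope_spec : Claim_equal_build_field_scope := by
  intro rf _
  unfold Spec_build_field_scope
  rw [loopA_eq]
  have hnd : (rf.foldl
      (fun d f => d.modify (pvKey f) [] (fun s => PySem.Set.add s (pvSfx f)))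
      PySem.Dict.empty).keys.Nodup := by
    exact PySem.Dict.nodup_keys_foldl_modify_key rf pvKey [] (fun _ f s => PySem.Set.add s (pvSfx f)) PySem.Dict.empty (by simp)
  rw [PySem.Dict.items_eq_map_keys _ hnd []]
  rw [PySem.Dict.keys_foldl_modify_key rf pvKey [] (fun _ f s => PySem.Set.add s (pvSfx f)) PySem.Dict.empty]
  simp only [build_field_scope_alt, List.map_map]
  have hroots : PySem.Set.update (PySem.Dict.keys (PySem.Dict.empty : PySem.Dict String (PySem.Set String))) (rf.map pvKey)
      = PySem.List.dedup (rf.map (bfsRoot ∘ bfsParts)) := by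
    rw [PySem.List.dedup_eq_ofList, comp_key]
    rfl
  rw [hroots]
  apply List.map_congr_left
  intro r _
  rw [getD_loop]
  have hfil : (rf.map bfsParts).filter (fun p => bfsRoot p == r)
      = (rf.filter (fun f => pvKey f == r)).map bfsParts := by
    rw [List.filter_map]
    rfl
  rw [hfil, List.map_map, comp_sfx]
  rw [PySem.Set.ofList_eq_foldl]
  simp [PySem.Set.update]
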